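-- pv_equiv track=rewrite | github.com/phatneglo/agentic-rag-boilerplate | app/agents/agents/analysis_agent.py | _process_list_content
-- ===== SOURCE A (Python) =====
-- from typing import Dict, Any, List
--
-- def _process_list_content(content_lines: List[str]) -> List[str]:
--     """Process content into list format."""
--     items = []
--     current_item = []
--
--     for line in content_lines:
--         if line.startswith(('-', '•', '*', '1.', '2.', '3.', '4.', '5.')):
--             if current_item:
--                 items.append(' '.join(current_item))
--             current_item = [line.lstrip('-•*0123456789. ')]
--         else:
--             current_item.append(line)
--
--     if current_item:
--         items.append(' '.join(current_item))
--
--     return items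
-- ===== SOURCE B (Python) =====
-- MARKERS = ('-', '•', '*', '1.', '2.', '3.', '4.', '5.')
-- STRIP = '-•*0123456789. '
--
-- def _process_list_content(content_lines):
--     """Process content into list format."""
--     def split_run(lines):
--         # longest non-marker prefix, and the remainder
--         k = 0
--         while k < len(lines) and not lines[k].startswith(MARKERS):
--             k += 1
--         return lines[:k], lines[k:]
--
--     pre, rest = split_run(content_lines)
--     items = [' '.join(pre)] if pre else []
--     while rest:
--         head, tail = rest[0], rest[1:]
--         body, rest = split_run(tail)
--         items.append(' '.join([head.lstrip(STRIP)] + body))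
--     return items
-- ===== Notes on version B (the rewrite author's own statement) =====
-- stated objective: alternative
-- what changed: Replaced the single-pass fold carrying a current_item accumulator by a run-splitting decomposition: a split_run helper cuts off the longest non-marker prefix, the preamble is emitted once, and a while loop consumes one marker-headed segment per iteration.
import Mathlib
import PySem

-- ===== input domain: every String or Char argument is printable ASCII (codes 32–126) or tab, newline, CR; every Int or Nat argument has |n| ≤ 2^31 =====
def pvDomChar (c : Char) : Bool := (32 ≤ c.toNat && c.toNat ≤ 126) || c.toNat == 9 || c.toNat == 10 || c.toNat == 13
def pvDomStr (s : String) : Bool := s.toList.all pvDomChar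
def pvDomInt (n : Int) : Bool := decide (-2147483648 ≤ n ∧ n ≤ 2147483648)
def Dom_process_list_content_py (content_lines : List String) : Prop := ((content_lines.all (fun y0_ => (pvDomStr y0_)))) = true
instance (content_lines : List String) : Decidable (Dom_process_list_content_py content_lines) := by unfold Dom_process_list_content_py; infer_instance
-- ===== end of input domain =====

-- B restructures A's fold (items, current_item accumulator) into run-splitting:
-- cut off the longest non-marker prefix, then consume one marker-headed segment per step.

-- shared primitives of both Pythons: the startswith tuple test, lstrip('-•*0123456789. '), ' '.join
def pvIsMark (s : String) : Bool :=
  ["-", "•", "*", "1.", "2.", "3.", "4.", "5."].any (fun p => PySem.Str.startswith s p)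

-- hand port of str.lstrip(chars) (no PySem primitive takes a char set on one side):
-- drop leading characters that are in the set; exact for any string
def pvLstrip (s : String) : String :=
  String.mk (s.toList.dropWhile (fun c => ("-•*0123456789. ".toList).contains c))

def pvJoin (parts : List String) : String := PySem.Str.join " " parts

-- ===== PORT A =====
-- the for-loop over content_lines with state (items, current_item), then the final flush
def pvALoop (lines items cur : List String) : List String × List String :=
  match lines with
  | [] => (items, cur)
  | l :: ls =>
    if pvIsMark l then
      pvALoop ls (if cur ≠ [] then items ++ [pvJoin cur] else items) [pvLstrip l]
    else
      pvALoop ls items (cur ++ [l])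

def process_list_content_py (content_lines : List String) : List String :=
  let st := pvALoop content_lines [] []
  if st.2 ≠ [] then st.1 ++ [pvJoin st.2] else st.1

-- ===== PORT B =====
-- split_run: (longest non-marker prefix, remainder) — B's while loop with index k
def pvSplitRun (lines : List String) : List String × List String :=
  match lines with
  | [] => ([], [])
  | l :: ls =>
    if pvIsMark l then ([], l :: ls)
    else
      let p := pvSplitRun ls
      (l :: p.1, p.2)

-- needed by the port's termination: the remainder is no longer than the input
theorem pvSplitRun_len (lines : List String) : (pvSplitRun lines).2.length ≤ lines.length := by
  induction lines with
  | nil => simp [pvSplitRun]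
  | cons l ls ih =>
    simp only [pvSplitRun]
    split
    · simp
    · simpa using Nat.le_succ_of_le ih

-- B's while loop: one marker-headed segment per iteration
def pvBLoop (rest : List String) : List String :=
  match rest with
  | [] => []
  | head :: tail =>
    let p := pvSplitRun tail
    pvJoin (pvLstrip head :: p.1) :: pvBLoop p.2
termination_by rest.length
decreasing_by
  simpa using Nat.lt_succ_of_le (pvSplitRun_len tail)

def process_list_content_py_alt (content_lines : List String) : List String :=
  let p := pvSplitRun content_lines
  (if p.1 ≠ [] then [pvJoin p.1] else []) ++ pvBLoop p.2

-- ===== PRECONDITION & SPEC =====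
def Spec_process_list_content_py (content_lines : List String) (out : List String) : Prop := out = process_list_content_py_alt content_lines
instance (content_lines : List String) (out : List String) : Decidable (Spec_process_list_content_py content_lines out) := by unfold Spec_process_list_content_py; infer_instance

-- ===== CLAIM (what is proved, stated in full; the proofs are below) =====
def Claim_equal_process_list_content_py : Prop := ∀ (content_lines : List String), Dom_process_list_content_py content_lines → Spec_process_list_content_py content_lines (process_list_content_py content_lines)

-- ===== LEMMAS AND PROOFS =====

-- finishing step of A (the final flush), as a function of the loop state
def pvFin (p : List String × List String) : List String :=
  if p.2 ≠ [] then p.1 ++ [pvJoin p.2] else p.1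

-- the items accumulator only grows on the left
theorem pvALoop_items (lines : List String) : ∀ (items cur : List String),
    pvALoop lines items cur = (items ++ (pvALoop lines [] cur).1, (pvALoop lines [] cur).2) := by
  induction lines with
  | nil => intro items cur; simp [pvALoop]
  | cons l ls ih =>
    intro items cur
    simp only [pvALoop]
    by_cases h : pvIsMark l
    · simp only [h, if_true]
      by_cases hc : cur = []
      · simp [hc, ih items]
      · rw [if_pos (by simpa using hc), if_pos (by simpa using hc)]
        rw [ih (items ++ [pvJoin cur]), ih ([] ++ [pvJoin cur])]
        simp
    · simp only [h, Bool.false_eq_true, if_false]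
      exact ih items (cur ++ [l])

-- the core invariant: A's finished loop from state cur equals the preamble cur++pre flushed, then B's segments
theorem pvMain (lines : List String) : ∀ (cur : List String),
    pvFin (pvALoop lines [] cur) =
      (if cur ++ (pvSplitRun lines).1 ≠ [] then [pvJoin (cur ++ (pvSplitRun lines).1)] else [])
        ++ pvBLoop (pvSplitRun lines).2 := by
  induction lines with
  | nil => intro cur; simp [pvALoop, pvSplitRun, pvFin, pvBLoop]
  | cons l ls ih =>
    intro cur
    simp only [pvALoop, pvSplitRun]
    by_cases h : pvIsMark l
    · simp only [h, if_true]
      rw [pvALoop_items ls _ [pvLstrip l]]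
      have hfin : pvFin (pvALoop ls [] [pvLstrip l]) =
          [pvJoin (pvLstrip l :: (pvSplitRun ls).1)] ++ pvBLoop (pvSplitRun ls).2 := by
        rw [ih [pvLstrip l]]
        simp
      by_cases hc : cur = []
      · subst hc
        simp only [ne_eq, not_true_eq_false, if_false, List.nil_append]
        unfold pvFin
        rcases hp : pvALoop ls [] [pvLstrip l] with ⟨a, b⟩
        have := hfin; rw [hp] at this
        unfold pvFin at this
        simp only [pvBLoop]
        by_cases hb : b = [] <;> simp [hb] at this ⊢ <;> simp [this]
      · rw [if_pos (by simpa using hc), if_pos (by simp [hc])]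
        unfold pvFin
        rcases hp : pvALoop ls [] [pvLstrip l] with ⟨a, b⟩
        have := hfin; rw [hp] at this
        unfold pvFin at this
        simp only [pvBLoop]
        by_cases hb : b = [] <;> simp [hb] at this ⊢ <;> simp [this]
    · simp only [h, Bool.false_eq_true, if_false]
      rw [ih (cur ++ [l])]
      simp

-- ===== VERDICT (by name: the statement is the Claim_ definition above) =====
theorem process_list_content_py_spec : Claim_equal_process_list_content_py := by
  intro content_lines _
  unfold Spec_process_list_content_py process_list_content_py process_list_content_py_alt
  have := pvMain content_lines []
  simpa [pvFin] using this
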